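-- pv_equiv track=rewrite | github.com/w40141/verilog | clefia/work/attack.py | find_tran
-- ===== SOURCE A (Python) =====
-- def compare_li(reg_li, s, n):
--     series_li = []
--     e = s + n
--     for i, src_reg in enumerate(reg_li):
--         for j, dst_reg in enumerate(reg_li):
--             if i != j:
--                 if src_reg[s:e] == dst_reg[s + 1:e + 1]:
--                     series_li.append([i, j])
--     return series_li
--
-- def find_tran(t_scan_li, tran_dic):
--     for i in range(0, len(t_scan_li[0]), 5):
--         series_li = compare_li(t_scan_li, i, 10)
--         if len(series_li) >= 64:
--             tmp_li = list(map(str, series_li))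
--             for t in tmp_li:
--                 tran_dic[t] += 1
--     return tran_dic
-- ===== SOURCE B (Python) =====
-- def find_tran(t_scan_li, tran_dic):
--     for s in range(0, len(t_scan_li[0]), 5):
--         # bucket registers by their shifted slice, then look each source slice up
--         buckets = {}
--         for j, reg in enumerate(t_scan_li):
--             buckets.setdefault(reg[s + 1:s + 11], []).append(j)
--         series = []
--         for i, reg in enumerate(t_scan_li):
--             for j in buckets.get(reg[s:s + 10], []):
--                 if j != i:
--                     series.append((i, j))
--         if len(series) >= 64:
--             for i, j in series:
--                 tran_dic["[%d, %d]" % (i, j)] += 1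
--     return tran_dic
-- ===== Notes on version B (the rewrite author's own statement) =====
-- stated objective: faster
-- what changed: Per window, B buckets every register's shifted slice in a dict and looks each source slice up once, replacing A's all-pairs slice comparison (compare_li) by a hash-index scan.
import Mathlib
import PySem

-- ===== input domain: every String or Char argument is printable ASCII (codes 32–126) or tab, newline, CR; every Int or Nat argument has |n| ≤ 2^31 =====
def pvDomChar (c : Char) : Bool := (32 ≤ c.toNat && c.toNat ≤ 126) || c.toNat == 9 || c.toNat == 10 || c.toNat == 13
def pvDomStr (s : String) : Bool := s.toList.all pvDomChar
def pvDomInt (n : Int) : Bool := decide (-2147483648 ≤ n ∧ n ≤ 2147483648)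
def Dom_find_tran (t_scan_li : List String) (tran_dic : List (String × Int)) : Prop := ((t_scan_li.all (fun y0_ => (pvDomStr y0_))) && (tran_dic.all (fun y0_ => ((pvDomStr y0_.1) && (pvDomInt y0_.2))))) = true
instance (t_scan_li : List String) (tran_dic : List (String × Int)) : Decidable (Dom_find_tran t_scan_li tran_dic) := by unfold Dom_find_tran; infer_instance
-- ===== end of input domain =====

-- B replaces A's quadratic per-window pair scan by a hash of shifted slices with one lookup
-- per register (objective: faster). Python A mutates tran_dic in place and returns it; B performs
-- the same mutation; the equivalence proved here is about the RETURN value.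

-- str([i, j]) for two ints — exact Python formatting, used by both ports
def pyStrPair (p : Int × Int) : String :=
  String.ofList ('[' :: PySem.Int.toChars p.1 ++ ',' :: ' ' :: PySem.Int.toChars p.2 ++ [']'])

-- ===== PORT A =====
def compare_li (reg_li : List String) (s n : Int) : List (Int × Int) :=
  let e := s + n
  (PySem.List.enumerate reg_li).foldl (fun series_li p =>
    (PySem.List.enumerate reg_li).foldl (fun series_li q =>
      if p.1 ≠ q.1 then
        if PySem.List.slice p.2.toList (some s) (some e)
             = PySem.List.slice q.2.toList (some (s + 1)) (some (e + 1))
        then series_li ++ [(p.1, q.1)] else series_li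
      else series_li) series_li) []

def find_tran (t_scan_li : List String) (tran_dic : List (String × Int)) : List (String × Int) :=
  ((PySem.List.pyRange 0 (PySem.Str.len (PySem.List.pyGetD t_scan_li 0 "")) 5).foldl
    (fun dic i =>
      let series_li := compare_li t_scan_li i 10
      if 64 ≤ PySem.List.len series_li then
        let tmp_li := series_li.map pyStrPair
        -- tran_dic[t] += 1 (KeyError on a missing key is excluded by Pre_)
        tmp_li.foldl (fun dic t => dic.modify t 0 (· + 1)) dic
      else dic)
    (PySem.Dict.ofList tran_dic)).items

-- ===== PORT B =====
def find_tran_alt (t_scan_li : List String) (tran_dic : List (String × Int)) : List (String × Int) :=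
  ((PySem.List.pyRange 0 (PySem.Str.len (PySem.List.pyGetD t_scan_li 0 "")) 5).foldl
    (fun dic s =>
      -- buckets.setdefault(reg[s+1:s+11], []).append(j)  ==  d[k] = d.get(k, []) + [j]
      let buckets := (PySem.List.enumerate t_scan_li).foldl
        (fun d p => d.modify (PySem.List.slice p.2.toList (some (s + 1)) (some (s + 11))) [] (· ++ [p.1]))
        PySem.Dict.empty
      let series := (PySem.List.enumerate t_scan_li).foldl
        (fun ser p =>
          (buckets.getD (PySem.List.slice p.2.toList (some s) (some (s + 10))) []).foldl
            (fun ser j => if j ≠ p.1 then ser ++ [(p.1, j)] else ser) ser) []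
      if 64 ≤ PySem.List.len series then
        series.foldl (fun dic q => dic.modify (pyStrPair q) 0 (· + 1)) dic
      else dic)
    (PySem.Dict.ofList tran_dic)).items

-- ===== PRECONDITION & SPEC =====
-- the matching pairs of window s, stated over index ranges (independent of both ports)
def winPairs (regs : List String) (s : Int) : List (Int × Int) :=
  (PySem.List.pyRange 0 (PySem.List.len regs) 1).flatMap (fun i =>
    ((PySem.List.pyRange 0 (PySem.List.len regs) 1).filter (fun j =>
      decide (i ≠ j) &&
        (PySem.List.slice (PySem.List.pyGetD regs i "").toList (some s) (some (s + 10))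
          == PySem.List.slice (PySem.List.pyGetD regs j "").toList (some (s + 1)) (some (s + 11))))).map
      (fun j => (i, j)))

-- Pre_ excludes exactly where Python A raises: the empty register list (IndexError on
-- t_scan_li[0]) and inputs where some window reaches the 64-pair threshold while one of its
-- pair keys "[i, j]" is missing from tran_dic (KeyError on tran_dic[t] += 1).
def Pre_find_tran (t_scan_li : List String) (tran_dic : List (String × Int)) : Prop :=
  t_scan_li ≠ [] ∧
  ∀ s ∈ PySem.List.pyRange 0 (PySem.Str.len (t_scan_li.headD "")) 5,
    64 ≤ PySem.List.len (winPairs t_scan_li s) →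
      ∀ p ∈ winPairs t_scan_li s, pyStrPair p ∈ tran_dic.map (·.1)
instance (t_scan_li : List String) (tran_dic : List (String × Int)) : Decidable (Pre_find_tran t_scan_li tran_dic) := by unfold Pre_find_tran; infer_instance

def pvWitness_find_tran : List String × (List (String × Int)) := (["ab", "cd"], [("[0, 1]", 3)])

def Spec_find_tran (t_scan_li : List String) (tran_dic : List (String × Int)) (out : List (String × Int)) : Prop := out = find_tran_alt t_scan_li tran_dic
instance (t_scan_li : List String) (tran_dic : List (String × Int)) (out : List (String × Int)) : Decidable (Spec_find_tran t_scan_li tran_dic out) := by unfold Spec_find_tran; infer_instance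

-- ===== CLAIM (what is proved, stated in full; the proofs are below) =====
def Claim_equal_find_tran : Prop := ∀ (t_scan_li : List String) (tran_dic : List (String × Int)), Dom_find_tran t_scan_li tran_dic → Pre_find_tran t_scan_li tran_dic → Spec_find_tran t_scan_li tran_dic (find_tran t_scan_li tran_dic)

-- ===== LEMMAS AND PROOFS =====

-- B's bucket lookup lists exactly the (ascending) indices whose shifted slice equals the key
lemma buckets_getD (regs : List String) (s : Int) (key : List Char) :
    ((PySem.List.enumerate regs).foldl
      (fun d p => d.modify (PySem.List.slice p.2.toList (some (s + 1)) (some (s + 11))) [] (· ++ [p.1]))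
      PySem.Dict.empty).getD key []
    = ((PySem.List.enumerate regs).filter
        (fun q => PySem.List.slice q.2.toList (some (s + 1)) (some (s + 11)) == key)).map (·.1) := by
  have h := PySem.Dict.getD_foldl_modify_append
      (l := (PySem.List.enumerate regs).map (fun q : Int × String =>
        (PySem.List.slice q.2.toList (some (s + 1)) (some (s + 11)), q.1)))
      (d := (PySem.Dict.empty : PySem.Dict (List Char) (List Int))) (c := key)
  simp only [List.foldl_map, List.filter_map, List.map_map] at h
  simpa [Function.comp] using h

-- per source register, B's bucket scan appends the same segment as A's inner loop
lemma inner_eq (regs : List String) (s : Int) (p : Int × String) (ser : List (Int × Int)) :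
    (((PySem.List.enumerate regs).foldl
        (fun d q => d.modify (PySem.List.slice q.2.toList (some (s + 1)) (some (s + 11))) [] (· ++ [q.1]))
        PySem.Dict.empty).getD (PySem.List.slice p.2.toList (some s) (some (s + 10))) []).foldl
      (fun ser j => if j ≠ p.1 then ser ++ [(p.1, j)] else ser) ser
    = (PySem.List.enumerate regs).foldl
      (fun ser q =>
        if p.1 ≠ q.1 then
          if PySem.List.slice p.2.toList (some s) (some (s + 10))
               = PySem.List.slice q.2.toList (some (s + 1)) (some (s + 11))
          then ser ++ [(p.1, q.1)] else ser
        else ser) ser := by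
  rw [buckets_getD]
  rw [show (fun (ser : List (Int × Int)) (j : Int) => if j ≠ p.1 then ser ++ [(p.1, j)] else ser)
      = (fun ser j => if decide (j ≠ p.1) = true then ser ++ [(p.1, j)] else ser) from by
    funext ser j; by_cases h : j ≠ p.1 <;> simp [h]]
  rw [PySem.List.foldl_append_if]
  rw [show (fun (ser : List (Int × Int)) (q : Int × String) =>
        if p.1 ≠ q.1 then
          if PySem.List.slice p.2.toList (some s) (some (s + 10))
               = PySem.List.slice q.2.toList (some (s + 1)) (some (s + 11))
          then ser ++ [(p.1, q.1)] else ser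
        else ser)
      = (fun ser q =>
          if (decide (p.1 ≠ q.1)
              && (PySem.List.slice p.2.toList (some s) (some (s + 10))
                  == PySem.List.slice q.2.toList (some (s + 1)) (some (s + 11)))) = true
          then ser ++ [(p.1, q.1)] else ser) from by
    funext ser q
    by_cases h1 : p.1 ≠ q.1 <;>
      by_cases h2 : PySem.List.slice p.2.toList (some s) (some (s + 10))
        = PySem.List.slice q.2.toList (some (s + 1)) (some (s + 11)) <;>
      simp [h1, h2]]
  rw [PySem.List.foldl_append_if]
  rw [List.filter_map, List.map_map]
  congr 1
  rw [List.filter_filter]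
  apply congrArg
  apply List.filter_congr
  intro q _
  by_cases h1 : p.1 = q.1 <;>
    by_cases h2 : PySem.List.slice p.2.toList (some s) (some (s + 10))
      = PySem.List.slice q.2.toList (some (s + 1)) (some (s + 11)) <;>
    simp [Function.comp, h1, h2, eq_comm]

-- per window, B's series equals A's compare_li
lemma series_eq (regs : List String) (s : Int) :
    (PySem.List.enumerate regs).foldl
      (fun ser p =>
        (((PySem.List.enumerate regs).foldl
            (fun d q => d.modify (PySem.List.slice q.2.toList (some (s + 1)) (some (s + 11))) [] (· ++ [q.1]))
            PySem.Dict.empty).getD (PySem.List.slice p.2.toList (some s) (some (s + 10))) []).foldl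
          (fun ser j => if j ≠ p.1 then ser ++ [(p.1, j)] else ser) ser) []
    = compare_li regs s 10 := by
  unfold compare_li
  simp only [show s + 10 + 1 = s + 11 from by ring]
  apply PySem.List.foldl_congr_mem
  intro ser p _
  exact inner_eq regs s p ser

-- ===== VERDICT (by name: the statement is the Claim_ definition above) =====
theorem find_tran_spec : Claim_equal_find_tran := by
  intro t_scan_li tran_dic _ _
  unfold Spec_find_tran find_tran find_tran_alt
  apply congrArg
  apply PySem.List.foldl_congr_mem
  intro dic s _
  simp only [series_eq]
  split
  · simp only [List.foldl_map]
  · rfl
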